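-- pv_equiv track=rewrite | github.com/cpech/python-exercises | MaxAscendingSlice.py | solution
-- ===== SOURCE A (Python) =====
-- def solution(A):
--     max_slice_start=0
--     max_slice_size=1
--     current_slice_size=1
--     current_slice_start=0
--     n=len(A)
--     for i in range(1,n):
--         if A[i]>A[i-1]: #if current slice continues to grow
--             current_slice_size+=1
--         else: #current slice ends
--             if current_slice_size>max_slice_size: #if the now ended current slice is longer than the previous max
--                 max_slice_size=current_slice_size #update max slice
--                 max_slice_start=current_slice_start
--             current_slice_start=i #start new slice at i
--             current_slice_size=1 #it has size 1
--     if current_slice_size>max_slice_size: #if current_slice wasn't ended at n and is now bigger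
--         return current_slice_start
--     else:
--         return max_slice_start
--     pass
-- ===== SOURCE B (Python) =====
-- def _runs(D):
--     runs = []
--     for x in D:
--         if runs and runs[-1][0] == x:
--             runs[-1][1] += 1
--         else:
--             runs.append([x, 1])
--     return runs
--
-- def solution(A):
--     D = [b > a for a, b in zip(A, A[1:])]
--     best_j = 0
--     best_len = 0
--     j = 0
--     for val, ln in _runs(D):
--         if val and ln > best_len:
--             best_j = j
--             best_len = ln
--         j += ln
--     return best_j
-- ===== Notes on version B (the rewrite author's own statement) =====
-- stated objective: alternative
-- what changed: Replaces A's single-pass current/max state machine over indices with a build-then-scan decomposition: construct the boolean adjacent-difference list, run-length-encode it, and pick the first longest True run's diff-index as the slice start.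
import Mathlib
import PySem

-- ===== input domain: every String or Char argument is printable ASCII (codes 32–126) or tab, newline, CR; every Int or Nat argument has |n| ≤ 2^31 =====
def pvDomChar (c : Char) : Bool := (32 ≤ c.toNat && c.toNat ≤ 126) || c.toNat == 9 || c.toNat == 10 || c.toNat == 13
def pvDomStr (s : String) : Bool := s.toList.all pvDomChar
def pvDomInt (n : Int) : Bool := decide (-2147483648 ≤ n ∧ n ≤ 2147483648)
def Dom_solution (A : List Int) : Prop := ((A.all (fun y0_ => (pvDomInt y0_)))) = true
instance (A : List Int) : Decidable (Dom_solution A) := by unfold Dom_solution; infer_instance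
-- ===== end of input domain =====

-- B replaces A's single-pass current/max state machine with a build-then-scan decomposition
-- (boolean diff list, run-length encoding, first longest True run); alternative, same cost.

-- ===== PORT A =====
-- state (max_slice_start, max_slice_size, current_slice_size, current_slice_start)
def solution (A : List Int) : Int :=
  let n : Int := A.length
  let st := (PySem.List.pyRange 1 n 1).foldl
    (fun (s : Int × Int × Int × Int) i =>
      if PySem.List.pyGetD A i 0 > PySem.List.pyGetD A (i - 1) 0 then
        (s.1, s.2.1, s.2.2.1 + 1, s.2.2.2)
      else
        if s.2.2.1 > s.2.1 then (s.2.2.2, s.2.2.1, 1, i)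
        else (s.1, s.2.1, 1, i))
    (0, 1, 1, 0)
  if st.2.2.1 > st.2.1 then st.2.2.2 else st.1

-- ===== PORT B =====
-- _runs in Source B: run-length encoding, built front-to-back mutating the last run
def pvRunsStep (runs : List (Bool × Int)) (x : Bool) : List (Bool × Int) :=
  match runs.getLast? with
  | some (v, c) => if v = x then runs.dropLast ++ [(v, c + 1)] else runs ++ [(x, 1)]
  | none => [(x, 1)]

def pvRuns (D : List Bool) : List (Bool × Int) := D.foldl pvRunsStep []

-- state (best_j, best_len, j)
def solution_alt (A : List Int) : Int :=
  let D := (A.zip (A.drop 1)).map (fun p => decide (p.2 > p.1))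
  let st := (pvRuns D).foldl
    (fun (s : Int × Int × Int) r =>
      if r.1 && decide (r.2 > s.2.1) then (s.2.2, r.2, s.2.2 + r.2)
      else (s.1, s.2.1, s.2.2 + r.2))
    (0, 0, 0)
  st.1

-- ===== PRECONDITION & SPEC =====
def Spec_solution (A : List Int) (out : Int) : Prop := out = solution_alt A
instance (A : List Int) (out : Int) : Decidable (Spec_solution A out) := by unfold Spec_solution; infer_instance

-- ===== CLAIM (what is proved, stated in full; the proofs are below) =====
def Claim_equal_solution : Prop := ∀ (A : List Int), Dom_solution A → Spec_solution A (solution A)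

-- ===== LEMMAS AND PROOFS =====

-- proof-side names for the two fold bodies and A's finalizer
def stepAF (A : List Int) (s : Int × Int × Int × Int) (i : Int) : Int × Int × Int × Int :=
  if PySem.List.pyGetD A i 0 > PySem.List.pyGetD A (i - 1) 0 then
    (s.1, s.2.1, s.2.2.1 + 1, s.2.2.2)
  else
    if s.2.2.1 > s.2.1 then (s.2.2.2, s.2.2.1, 1, i)
    else (s.1, s.2.1, 1, i)

def finalizeA (st : Int × Int × Int × Int) : Int :=
  if st.2.2.1 > st.2.1 then st.2.2.2 else st.1

def stepB (s : Int × Int × Int) (r : Bool × Int) : Int × Int × Int :=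
  if r.1 && decide (r.2 > s.2.1) then (s.2.2, r.2, s.2.2 + r.2)
  else (s.1, s.2.1, s.2.2 + r.2)

def diffs (A : List Int) : List Bool := (A.zip (A.drop 1)).map (fun p => decide (p.2 > p.1))

-- A's loop as a state machine over the diff list
def simA (ms mz cs ci i : Int) : List Bool → Int
  | [] => if cs > mz then ci else ms
  | d :: ds =>
      if d then simA ms mz (cs + 1) ci (i + 1) ds
      else if cs > mz then simA ci cs 1 i (i + 1) ds
      else simA ms mz 1 i (i + 1) ds

-- natural front-recursive run-length encoding with a pending run (v, c)
def rleGo (v : Bool) (c : Int) : List Bool → List (Bool × Int)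
  | [] => [(v, c)]
  | y :: ys => if v = y then rleGo v (c + 1) ys else (v, c) :: rleGo y 1 ys

lemma solution_eq (A : List Int) :
    solution A = finalizeA ((PySem.List.pyRange 1 (A.length : Int) 1).foldl (stepAF A) (0, 1, 1, 0)) := rfl

lemma solution_alt_eq (A : List Int) :
    solution_alt A = ((pvRuns (diffs A)).foldl stepB (0, 0, 0)).1 := rfl

lemma diffs_length (A : List Int) : (diffs A).length = A.length - 1 := by
  simp [diffs]

lemma diffs_getElem (A : List Int) (m : Nat) (h : m < (diffs A).length) :
    (diffs A)[m] = decide (A[m + 1]'(by have := diffs_length A; omega) > A[m]'(by have := diffs_length A; omega)) := by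
  simp [diffs]

lemma pvRunsStep_concat (rs : List (Bool × Int)) (v : Bool) (c : Int) (y : Bool) :
    pvRunsStep (rs ++ [(v, c)]) y
      = if v = y then rs ++ [(v, c + 1)] else (rs ++ [(v, c)]) ++ [(y, 1)] := by
  cases h : decide (v = y) <;>
    simp_all [pvRunsStep]

lemma pvRuns_foldl_concat (D : List Bool) : ∀ (rs : List (Bool × Int)) (v : Bool) (c : Int),
    D.foldl pvRunsStep (rs ++ [(v, c)]) = rs ++ rleGo v c D := by
  induction D with
  | nil => intro rs v c; simp [rleGo]
  | cons y ys ih =>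
      intro rs v c
      rw [List.foldl_cons, pvRunsStep_concat]
      simp only [rleGo]
      split_ifs with h
      · exact ih rs v (c + 1)
      · rw [ih (rs ++ [(v, c)]) y 1, List.append_assoc]
        rfl

lemma pvRuns_cons (d : Bool) (ds : List Bool) : pvRuns (d :: ds) = rleGo d 1 ds := by
  have := pvRuns_foldl_concat ds [] d 1
  simpa [pvRuns, pvRunsStep] using this

-- main invariant: A's state machine equals B's fold over the run encoding
lemma simA_eq_runs (D : List Bool) : ∀ (v : Bool) (c bj bl j ms mz cs ci i : Int),
    1 ≤ c → 0 ≤ bl →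
    cs = (if v then c + 1 else 1) → ci = i - cs → j = i - 1 - c →
    mz = bl + 1 → ms = bj →
    simA ms mz cs ci i D = ((rleGo v c D).foldl stepB (bj, bl, j)).1 := by
  induction D with
  | nil =>
      intro v c bj bl j ms mz cs ci i hc hbl hcs hci hj hmz hms
      cases v <;> simp at hcs
      · simp only [simA, rleGo, List.foldl_cons, List.foldl_nil, stepB, Bool.false_and,
          Bool.false_eq_true, eq_self_iff_true, if_true, if_false]
        rw [if_neg (by omega)]
        exact hms
      · simp only [simA, rleGo, List.foldl_cons, List.foldl_nil, stepB, Bool.true_and,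
          decide_eq_true_eq]
        by_cases h : c > bl
        · rw [if_pos (by omega), if_pos h]
          exact (by omega : ci = j)
        · rw [if_neg (by omega), if_neg h]
          exact hms
  | cons d ds ih =>
      intro v c bj bl j ms mz cs ci i hc hbl hcs hci hj hmz hms
      cases v <;> cases d <;> simp at hcs <;>
        simp only [simA, rleGo, List.foldl_cons, stepB, Bool.false_eq_true, eq_self_iff_true,
          if_true, if_false, reduceCtorEq, Bool.false_and, Bool.true_and, decide_eq_true_eq]
      · -- v = false, d = false
        rw [if_neg (by omega)]
        exact ih false (c + 1) bj bl j ms mz 1 i (i + 1) (by omega) hbl (by simp)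
          (by omega) (by omega) hmz hms
      · -- v = false, d = true
        exact ih true 1 bj bl (j + c) ms mz (cs + 1) ci (i + 1) (by omega) hbl (by simp; omega)
          (by omega) (by omega) hmz hms
      · -- v = true, d = false
        by_cases h : c > bl
        · rw [if_pos (by omega), if_pos h]
          exact ih false 1 j c (j + c) ci cs 1 i (i + 1) (by omega) (by omega) (by simp)
            (by omega) (by omega) (by omega) (by omega)
        · rw [if_neg (by omega), if_neg h]
          exact ih false 1 bj bl (j + c) ms mz 1 i (i + 1) (by omega) hbl (by simp)
            (by omega) (by omega) hmz hms
      · -- v = true, d = true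
        exact ih true (c + 1) bj bl j ms mz (cs + 1) ci (i + 1) (by omega) hbl (by simp; omega)
          (by omega) (by omega) hmz hms

-- A's range fold equals the state machine over the diff list
lemma foldlA_eq_simA (A : List Int) : ∀ (k m : Nat) (st : Int × Int × Int × Int),
    (diffs A).length - m = k → m ≤ (diffs A).length →
    finalizeA ((PySem.List.pyRange ((m : Int) + 1) (A.length : Int) 1).foldl (stepAF A) st)
      = simA st.1 st.2.1 st.2.2.1 st.2.2.2 ((m : Int) + 1) ((diffs A).drop m) := by
  intro k
  induction k with
  | zero =>
      intro m st hk hm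
      have hlen := diffs_length A
      have hnil : PySem.List.pyRange ((m : Int) + 1) (A.length : Int) 1 = [] :=
        PySem.List.pyRange_one_eq_nil (by omega)
      rw [hnil, List.drop_eq_nil_of_le (by omega)]
      simp [finalizeA, simA]
  | succ k ih =>
      intro m st hk hm
      have hlen := diffs_length A
      have hmlt : m < (diffs A).length := by omega
      have hcons : PySem.List.pyRange ((m : Int) + 1) (A.length : Int) 1
          = ((m : Int) + 1) :: PySem.List.pyRange ((m : Int) + 1 + 1) (A.length : Int) 1 :=
        PySem.List.pyRange_one_cons (by omega)
      rw [hcons, List.foldl_cons, List.drop_eq_getElem_cons hmlt]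
      have hstep : stepAF A st ((m : Int) + 1) =
          (if (diffs A)[m] then (st.1, st.2.1, st.2.2.1 + 1, st.2.2.2)
           else if st.2.2.1 > st.2.1 then (st.2.2.2, st.2.2.1, 1, (m : Int) + 1)
           else (st.1, st.2.1, 1, (m : Int) + 1)) := by
        rw [diffs_getElem A m hmlt]
        have h1 : ((m : Int) + 1) = ((m + 1 : Nat) : Int) := by omega
        have h2 : ((m : Int) + 1 - 1) = ((m : Nat) : Int) := by push_cast; ring
        unfold stepAF
        rw [h2, h1, PySem.List.pyGetD_natCast, PySem.List.pyGetD_natCast]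
        have hm1 : m + 1 < A.length := by omega
        have hm0 : m < A.length := by omega
        rw [List.getD_eq_getElem _ _ hm1, List.getD_eq_getElem _ _ hm0]
        by_cases hgt : A[m + 1] > A[m]
        · simp [hgt]
        · simp [hgt]
      rw [hstep]
      have hcast : (((m + 1 : Nat) : Int)) + 1 = ((m : Int) + 1 + 1) := by push_cast; ring
      cases hd : (diffs A)[m]
      · simp only [Bool.false_eq_true, if_false, simA]
        by_cases hgt : st.2.2.1 > st.2.1
        · rw [if_pos hgt, if_pos hgt]
          have hrec := ih (m + 1) (st.2.2.2, st.2.2.1, 1, (m : Int) + 1) (by omega) (by omega)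
          rw [hcast] at hrec
          simpa using hrec
        · rw [if_neg hgt, if_neg hgt]
          have hrec := ih (m + 1) (st.1, st.2.1, 1, (m : Int) + 1) (by omega) (by omega)
          rw [hcast] at hrec
          simpa using hrec
      · simp only [if_true, simA]
        have hrec := ih (m + 1) (st.1, st.2.1, st.2.2.1 + 1, st.2.2.2) (by omega) (by omega)
        rw [hcast] at hrec
        simpa using hrec

-- ===== VERDICT =====
theorem solution_spec : Claim_equal_solution := by
  intro A _
  unfold Spec_solution
  rw [solution_eq, solution_alt_eq]
  have h0 := foldlA_eq_simA A ((diffs A).length) 0 (0, 1, 1, 0) (by omega) (by omega)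
  simp only [Nat.cast_zero, zero_add, List.drop_zero] at h0
  rw [h0]
  rcases hD : diffs A with _ | ⟨d, ds⟩
  · simp [simA, pvRuns]
  · rw [pvRuns_cons]
    cases d
    · simp only [simA, Bool.false_eq_true, if_false]
      rw [if_neg (by omega)]
      exact simA_eq_runs ds false 1 0 0 0 0 1 1 1 2 (by omega) (by omega) rfl (by omega) (by omega) rfl rfl
    · simp only [simA, if_true]
      exact simA_eq_runs ds true 1 0 0 0 0 1 2 0 2 (by omega) (by omega) rfl (by omega) (by omega) rfl rfl
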